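-- pv_equiv track=rewrite | github.com/jesperfjellin-kv/Omkod_NRL_til_FKB | omkod_NRL_til_FKB.py | ensure_belysning_for_masts
-- ===== SOURCE A (Python) =====
-- def ensure_belysning_for_masts(lines):
--     """
--     Sørger for at mastobjekter har korrekt belysningsattributter.
--     """
--     modified_lines = []
--     current_object_lines = []
--     is_mast = False
--     belysning_present = False
--
--     for line in lines:
--         if line.strip().startswith('.PUNKT'):
--             if current_object_lines:
--                 if is_mast and not belysning_present:
--                     for i, obj_line in enumerate(current_object_lines):
--                         if '..OBJTYPE Mast' in obj_line:
--                             current_object_lines.insert(i + 1, "..BELYSNING NEI\n")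
--                             break
--                 modified_lines.extend(current_object_lines)
--
--             current_object_lines = [line]
--             is_mast = '..OBJTYPE Mast' in line
--             belysning_present = False
--         else:
--             if '..OBJTYPE Mast' in line:
--                 is_mast = True
--             if '..BELYSNING' in line:
--                 belysning_present = True
--             current_object_lines.append(line)
--
--     if current_object_lines and is_mast and not belysning_present:
--         for i, obj_line in enumerate(current_object_lines):
--             if '..OBJTYPE Mast' in obj_line:
--                 current_object_lines.insert(i + 1, "..BELYSNING NEI\n")
--                 break
--     modified_lines.extend(current_object_lines)
--
--     return modified_lines
-- ===== SOURCE B (Python) =====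
-- def ensure_belysning_for_masts(lines):
--     MAST = '..OBJTYPE Mast'
--
--     def is_punkt(l):
--         return l.strip().startswith('.PUNKT')
--
--     def blocks(ls):
--         # split into object blocks, scanning right-to-left: each '.PUNKT' line
--         # starts a block; a leading block (before the first '.PUNKT') is kept as-is
--         res = []
--         for line in reversed(ls):
--             if res and not is_punkt(res[0][0]):
--                 res[0] = [line] + res[0]
--             else:
--                 res.insert(0, [line])
--         return res
--
--     def fix(block):
--         # attribute lines are the ones after the '.PUNKT' header (if the block has one)
--         body = block[1:] if is_punkt(block[0]) else block
--         if any(MAST in l for l in block) and not any('..BELYSNING' in l for l in body):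
--             j = next(i for i, l in enumerate(block) if MAST in l)
--             return block[:j + 1] + ['..BELYSNING NEI\n'] + block[j + 1:]
--         return block
--
--     return [l for b in blocks(lines) for l in fix(b)]
-- ===== Notes on version B (the rewrite author's own statement) =====
-- stated objective: simpler
-- what changed: A's single stateful pass with four accumulator variables, duplicated flush code and an in-place insert is replaced by a block decomposition: split the lines into object blocks at '.PUNKT' headers, purely fix each mast block that lacks a '..BELYSNING' attribute line, and concatenate.
import Mathlib
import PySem

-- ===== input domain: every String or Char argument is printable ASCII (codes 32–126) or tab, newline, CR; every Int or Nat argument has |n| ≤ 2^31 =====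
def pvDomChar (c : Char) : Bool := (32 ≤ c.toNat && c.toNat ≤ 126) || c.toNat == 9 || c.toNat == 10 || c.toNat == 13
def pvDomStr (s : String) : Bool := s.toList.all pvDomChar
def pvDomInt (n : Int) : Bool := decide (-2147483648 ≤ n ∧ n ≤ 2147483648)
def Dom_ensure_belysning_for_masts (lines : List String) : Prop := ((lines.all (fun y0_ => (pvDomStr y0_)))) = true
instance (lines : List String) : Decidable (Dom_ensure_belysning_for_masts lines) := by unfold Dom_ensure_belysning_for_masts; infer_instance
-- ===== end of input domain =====

-- B restructures A's stateful single pass (accumulators + in-place insert) as: split into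
-- object blocks, purely fix each mast block lacking ..BELYSNING, concatenate (objective: simpler).

-- ===== PORT A =====
def pvMastIn (l : String) : Bool := PySem.Str.isIn "..OBJTYPE Mast" l
def pvBelIn (l : String) : Bool := PySem.Str.isIn "..BELYSNING" l
def pvIsPunkt (l : String) : Bool := PySem.Str.startswith (PySem.Str.strip l) ".PUNKT"

-- A's inner `for i, obj_line in enumerate(…): if mast in obj_line: insert(i+1, X); break`
def pvInsertA : List String → List String
  | [] => []
  | l :: ls => if pvMastIn l then l :: "..BELYSNING NEI\n" :: ls else l :: pvInsertA ls

-- A's for-loop with its four state variables, then the final flush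
def pvLoopA : List String → List String → List String → Bool → Bool → List String
  | [], modified, cur, is_mast, bel =>
      modified ++ (if !cur.isEmpty && is_mast && !bel then pvInsertA cur else cur)
  | line :: rest, modified, cur, is_mast, bel =>
      if pvIsPunkt line then
        pvLoopA rest
          (modified ++ (if !cur.isEmpty then (if is_mast && !bel then pvInsertA cur else cur) else []))
          [line] (pvMastIn line) false
      else
        pvLoopA rest modified (cur ++ [line]) (is_mast || pvMastIn line) (bel || pvBelIn line)

def ensure_belysning_for_masts (lines : List String) : List String :=
  pvLoopA lines [] [] false false

-- ===== PORT B =====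
-- Source B's `blocks` (a right-to-left accumulation; transcribed as the corresponding right fold)
def pvBlocksB : List String → List (List String)
  | [] => []
  | l :: ls =>
    match pvBlocksB ls with
    | [] => [[l]]
    | b :: bs => if !pvIsPunkt (b.headD "") then (l :: b) :: bs else [l] :: b :: bs

-- Source B's `body = block[1:] if is_punkt(block[0]) else block`
def pvBody (b : List String) : List String := if pvIsPunkt (b.headD "") then b.tail else b

-- Source B's `fix`
def pvFix (b : List String) : List String :=
  if b.any pvMastIn && !((pvBody b).any pvBelIn) then
    let j := b.findIdx pvMastIn
    b.take (j + 1) ++ ["..BELYSNING NEI\n"] ++ b.drop (j + 1)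
  else b

def ensure_belysning_for_masts_alt (lines : List String) : List String :=
  (pvBlocksB lines).flatMap pvFix

-- ===== PRECONDITION & SPEC =====
def Spec_ensure_belysning_for_masts (lines : List String) (out : List String) : Prop := out = ensure_belysning_for_masts_alt lines
instance (lines : List String) (out : List String) : Decidable (Spec_ensure_belysning_for_masts lines out) := by unfold Spec_ensure_belysning_for_masts; infer_instance

-- ===== CLAIM (what is proved, stated in full; the proofs are below) =====
def Claim_equal_ensure_belysning_for_masts : Prop := ∀ (lines : List String), Dom_ensure_belysning_for_masts lines → Spec_ensure_belysning_for_masts lines (ensure_belysning_for_masts lines)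

-- ===== LEMMAS AND PROOFS =====

-- the open (still growing) block `cur` glued onto the blocks of the remaining lines
def pvGlue (cur : List String) (bs : List (List String)) : List (List String) :=
  if cur = [] then bs else
  match bs with
  | [] => [cur]
  | b :: bs' => if pvIsPunkt (b.headD "") then cur :: b :: bs' else (cur ++ b) :: bs'

lemma pvInsertA_eq (b : List String) (h : b.any pvMastIn = true) :
    pvInsertA b = b.take (b.findIdx pvMastIn + 1) ++ ["..BELYSNING NEI\n"] ++ b.drop (b.findIdx pvMastIn + 1) := by
  induction b with
  | nil => simp at h
  | cons l ls ih =>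
    by_cases hm : pvMastIn l = true
    · simp [pvInsertA, hm, List.findIdx_cons]
    · simp only [List.any_cons, hm, Bool.false_or] at h
      simp [pvInsertA, hm, List.findIdx_cons, ih h]

lemma pvFix_flush (cur : List String) (h : cur ≠ []) :
    (if !cur.isEmpty && cur.any pvMastIn && !((pvBody cur).any pvBelIn) then pvInsertA cur else cur)
      = pvFix cur := by
  have hne : cur.isEmpty = false := by simp [List.isEmpty_eq_false_iff, h]
  by_cases hm : cur.any pvMastIn = true
  · simp only [pvFix, hne, hm, Bool.not_false, Bool.true_and]
    by_cases hb : (pvBody cur).any pvBelIn = true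
    · simp [hb]
    · simp only [Bool.not_eq_true] at hb
      simp [hb, pvInsertA_eq cur hm]
  · simp only [Bool.not_eq_true] at hm
    simp [pvFix, hm, hne]

lemma pvBlocksB_cons (l : String) (ls : List String) :
    pvBlocksB (l :: ls) = pvGlue [l] (pvBlocksB ls) := by
  cases h : pvBlocksB ls with
  | nil => simp [pvBlocksB, pvGlue, h]
  | cons b bs =>
    by_cases hp : pvIsPunkt (b.head?.getD "") = true
    · simp [pvBlocksB, pvGlue, h, hp]
    · simp [pvBlocksB, pvGlue, h, hp]

lemma pvBlocksB_headD (l : String) (ls : List String) :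
    (((pvBlocksB (l :: ls)).head?.getD []).head?.getD "") = l := by
  cases h : pvBlocksB ls with
  | nil => simp [pvBlocksB, h]
  | cons b bs =>
    by_cases hp : pvIsPunkt (b.head?.getD "") = true
    · simp [pvBlocksB, h, hp]
    · simp [pvBlocksB, h, hp]

lemma pvGlue_snoc (cur : List String) (line : String) (bs : List (List String))
    (hl : pvIsPunkt line = false) :
    pvGlue cur (pvGlue [line] bs) = pvGlue (cur ++ [line]) bs := by
  cases bs with
  | nil =>
    by_cases hc : cur = [] <;> simp [pvGlue, hc, hl]
  | cons b bs' =>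
    by_cases hp : pvIsPunkt (b.head?.getD "") = true
    · by_cases hc : cur = [] <;> simp [pvGlue, hc, hl, hp]
    · by_cases hc : cur = [] <;> simp [pvGlue, hc, hl, hp]

lemma pvBody_snoc (cur : List String) (line : String) (hl : pvIsPunkt line = false) :
    (pvBody (cur ++ [line])).any pvBelIn = ((pvBody cur).any pvBelIn || pvBelIn line) := by
  cases cur with
  | nil =>
    have : pvIsPunkt "" = false := by decide
    simp [pvBody, hl, this]
  | cons c cs =>
    by_cases hp : pvIsPunkt c = true <;> simp [pvBody, hp, Bool.or_assoc]

lemma pvLoopA_eq (rest : List String) : ∀ (modified cur : List String),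
    pvLoopA rest modified cur (cur.any pvMastIn) ((pvBody cur).any pvBelIn)
      = modified ++ (pvGlue cur (pvBlocksB rest)).flatMap pvFix := by
  induction rest with
  | nil =>
    intro modified cur
    by_cases hc : cur = []
    · subst hc; simp [pvLoopA, pvGlue, pvBlocksB]
    · simp only [pvLoopA, pvBlocksB]
      rw [pvFix_flush cur hc]
      simp [pvGlue, hc]
  | cons line rest ih =>
    intro modified cur
    by_cases hl : pvIsPunkt line = true
    · -- flush, start a new block [line]
      have hstate : pvLoopA (line :: rest) modified cur (cur.any pvMastIn) ((pvBody cur).any pvBelIn)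
          = pvLoopA rest
              (modified ++ (if !cur.isEmpty then (if cur.any pvMastIn && !((pvBody cur).any pvBelIn) then pvInsertA cur else cur) else []))
              [line] (pvMastIn line) false := by
        simp [pvLoopA, hl]
      have h1 : ([line].any pvMastIn) = pvMastIn line := by simp
      have h2 : ((pvBody [line]).any pvBelIn) = false := by simp [pvBody, hl]
      rw [hstate, ← h1, ← h2, ih]
      rw [pvBlocksB_cons]
      by_cases hc : cur = []
      · subst hc; simp [pvGlue]
      · have hne : cur.isEmpty = false := by simp [List.isEmpty_eq_false_iff, hc]
        have hfix : (if !cur.isEmpty then (if cur.any pvMastIn && !((pvBody cur).any pvBelIn) then pvInsertA cur else cur) else [])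
            = pvFix cur := by
          rw [← pvFix_flush cur hc]; simp [hne]
        rw [hfix]
        -- the first block of pvBlocksB (line :: rest) starts with the punkt line
        cases hB : pvGlue [line] (pvBlocksB rest) with
        | nil =>
          exfalso
          cases h' : pvBlocksB rest with
          | nil => rw [h'] at hB; simp [pvGlue] at hB
          | cons b bs =>
            rw [h'] at hB
            by_cases hp : pvIsPunkt (b.head?.getD "") = true <;> simp [pvGlue, hp] at hB
        | cons b0 bs0 =>
          have hhead : b0.head?.getD "" = line := by
            have := pvBlocksB_headD line rest
            rw [pvBlocksB_cons, hB] at this; simpa using this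
          have : pvGlue cur (b0 :: bs0) = cur :: b0 :: bs0 := by
            simp [pvGlue, hc, hhead, hl]
          rw [this]
          simp [List.append_assoc]
    · -- non-punkt: line joins the current block
      have hl' : pvIsPunkt line = false := by simpa using hl
      have hstate : pvLoopA (line :: rest) modified cur (cur.any pvMastIn) ((pvBody cur).any pvBelIn)
          = pvLoopA rest modified (cur ++ [line]) ((cur ++ [line]).any pvMastIn) ((pvBody (cur ++ [line])).any pvBelIn) := by
        simp [pvLoopA, hl', pvBody_snoc cur line hl']
      rw [hstate, ih, pvBlocksB_cons, pvGlue_snoc cur line _ hl']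

-- ===== VERDICT (by name: the statement is the Claim_ definition above) =====
theorem ensure_belysning_for_masts_spec : Claim_equal_ensure_belysning_for_masts := by
  intro lines _
  show ensure_belysning_for_masts lines = ensure_belysning_for_masts_alt lines
  unfold ensure_belysning_for_masts ensure_belysning_for_masts_alt
  have h := pvLoopA_eq lines [] []
  rw [(by decide : ((pvBody ([] : List String)).any pvBelIn) = false)] at h
  simp only [List.any_nil, List.nil_append] at h
  rw [h]
  simp [pvGlue]
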